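-- pv_equiv track=rewrite | github.com/ArtyomPrasol/python_pr_Artyom_Prasol | labor1/task2_3_4.py | pal_up_true
-- ===== SOURCE A (Python) =====
-- def pal_up_true(x):
--     for char in str(x):
--         if(char.isdigit()):
--             return "В строке есть числа"
--     y = ""
--     for char in str(x):
--         if(char.isupper()):
--             y += str(char)
--     if (y == y[::-1]):
--         return "Палиндром"
--     else:
--         return "Не палиндром"
-- ===== SOURCE B (Python) =====
-- def pal_up_true(x):
--     s = str(x)
--     for char in s:
--         if char.isdigit():
--             return "В строке есть числа"
--     # palindrome test on the uppercase subsequence done IN PLACE on s: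
--     # two indices converge, skipping non-uppercase characters; no filtered
--     # intermediate string is ever built.
--     i, j = 0, len(s) - 1
--     while i < j:
--         if not s[i].isupper():
--             i += 1
--         elif not s[j].isupper():
--             j -= 1
--         elif s[i] != s[j]:
--             return "Не палиндром"
--         else:
--             i += 1
--             j -= 1
--     return "Палиндром"
-- ===== Notes on version B (the rewrite author's own statement) =====
-- stated objective: alternative
-- what changed: B never builds the uppercase string at all: it decides the palindrome directly on the original string with two converging indices that skip non-uppercase characters in place, instead of A's filter-into-a-new-string followed by reverse-slice comparison.
import Mathlib
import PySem

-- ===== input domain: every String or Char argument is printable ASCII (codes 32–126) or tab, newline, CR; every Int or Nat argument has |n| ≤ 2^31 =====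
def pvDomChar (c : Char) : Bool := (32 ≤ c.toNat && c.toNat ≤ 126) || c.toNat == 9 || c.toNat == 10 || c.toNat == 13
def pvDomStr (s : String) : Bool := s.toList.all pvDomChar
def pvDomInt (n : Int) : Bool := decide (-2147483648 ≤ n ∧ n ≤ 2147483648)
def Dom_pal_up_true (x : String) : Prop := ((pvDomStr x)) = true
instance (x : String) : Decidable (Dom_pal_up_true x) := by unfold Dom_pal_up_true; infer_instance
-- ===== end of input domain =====

-- B never materialises the uppercase string: it runs the palindrome test in place on the
-- original string with two converging indices that skip non-uppercase characters
-- (objective: alternative, same cost).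

-- ===== PORT A =====
-- A's first for-loop with its early return: yields the message at the first digit
def palAScan : List Char → Option String
  | [] => none
  | c :: rest =>
    if PySem.Chars.isdigit c then some "В строке есть числа" else palAScan rest

def pal_up_true (x : String) : String :=
  match palAScan x.toList with
  | some r => r
  | none =>
    -- y built by 'y += str(char)' on uppercase chars (string concat = List Char append, exact)
    let y := x.toList.foldl (fun acc c => if PySem.Chars.isupper c then acc ++ [c] else acc) ([] : List Char)
    -- y == y[::-1]: y[::-1] is y.reverse
    if y = y.reverse then "Палиндром" else "Не палиндром"

-- ===== PORT B =====
-- B's first for-loop (same early-return digit scan as the Python)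
def palBScan : List Char → Option String
  | [] => none
  | c :: rest =>
    if PySem.Chars.isdigit c then some "В строке есть числа" else palBScan rest

-- B's while-loop: i, j converge on the original string, skipping non-uppercase characters.
-- s[i] / s[j] are accessed only when i < j ≤ len s - 1, so both indices are in range and
-- getD is exact (Python never raises here).
def palBSkip (s : List Char) (i j : Nat) : String :=
  if i < j then
    if ¬ PySem.Chars.isupper (s.getD i ' ') then palBSkip s (i + 1) j
    else if ¬ PySem.Chars.isupper (s.getD j ' ') then palBSkip s i (j - 1)
    else if s.getD i ' ' ≠ s.getD j ' ' then "Не палиндром"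
    else palBSkip s (i + 1) (j - 1)
  else "Палиндром"
termination_by j - i

def pal_up_true_alt (x : String) : String :=
  match palBScan x.toList with
  | some r => r
  | none => palBSkip x.toList 0 (x.toList.length - 1)

-- ===== PRECONDITION & SPEC =====
def Spec_pal_up_true (x : String) (out : String) : Prop := out = pal_up_true_alt x
instance (x : String) (out : String) : Decidable (Spec_pal_up_true x out) := by unfold Spec_pal_up_true; infer_instance

-- ===== CLAIM (what is proved, stated in full; the proofs are below) =====
def Claim_equal_pal_up_true : Prop := ∀ (x : String), Dom_pal_up_true x → Spec_pal_up_true x (pal_up_true x)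

-- ===== LEMMAS AND PROOFS =====

theorem palScans_eq (l : List Char) : palBScan l = palAScan l := by
  induction l with
  | nil => rfl
  | cons c rest ih => simp [palAScan, palBScan, ih]

-- the uppercase subsequence of the window s[i..j] (inclusive)
def upSeg (s : List Char) (i j : Nat) : List Char :=
  ((s.drop i).take (j + 1 - i)).filter (fun c => PySem.Chars.isupper c)

theorem palBSkip_values (s : List Char) (i j : Nat) :
    palBSkip s i j = "Палиндром" ∨ palBSkip s i j = "Не палиндром" := by
  fun_induction palBSkip <;> simp_all

theorem seg_cons (s : List Char) (i j : Nat) (hij : i < j) (hj : j < s.length) :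
    (s.drop i).take (j + 1 - i) = s[i] :: (s.drop (i + 1)).take (j - i) := by
  have hi : i < s.length := by omega
  rw [List.drop_eq_getElem_cons hi]
  have e : j + 1 - i = (j - i) + 1 := by omega
  rw [e, List.take_succ_cons]

theorem seg_snoc (s : List Char) (i j : Nat) (hij : i ≤ j) (hj : j < s.length) :
    (s.drop i).take (j + 1 - i) = (s.drop i).take (j - i) ++ [s[j]] := by
  have e : j + 1 - i = (j - i) + 1 := by omega
  rw [e, List.take_add_one]
  congr 1
  have hg : (s.drop i)[j - i]? = some s[j] := by
    rw [List.getElem?_drop]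
    have e2 : i + (j - i) = j := by omega
    rw [e2, List.getElem?_eq_getElem hj]
  simp [hg]

theorem snoc_pal_iff {a b : Char} {m : List Char} :
    (a :: m ++ [b]) = (a :: m ++ [b]).reverse ↔ (a = b ∧ m = m.reverse) := by
  constructor
  · intro h
    have hr : (a :: m ++ [b]).reverse = b :: m.reverse ++ [a] := by simp
    rw [hr] at h
    have h1 : a = b := (List.cons_eq_cons.mp h).1
    have h2 : m ++ [b] = m.reverse ++ [a] := (List.cons_eq_cons.mp h).2
    rw [h1] at h2
    exact ⟨h1, by simpa using h2⟩
  · rintro ⟨rfl, hm⟩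
    conv_lhs => rw [hm]
    simp

theorem short_pal (l : List Char) (h : l.length ≤ 1) : l = l.reverse := by
  match l with
  | [] => rfl
  | [a] => rfl
  | a :: b :: t => simp at h

-- the mismatch/match decomposition: for i < j < len, the uppercase subsequence of s[i..j]
-- with s[i], s[j] both uppercase is s[i] :: (uppercase of s[i+1..j-1]) ++ [s[j]]
theorem upSeg_decomp (s : List Char) (i j : Nat) (hij : i < j) (hj : j < s.length)
    (hui : PySem.Chars.isupper s[i]) (huj : PySem.Chars.isupper s[j]) :
    upSeg s i j = s[i] :: upSeg s (i + 1) (j - 1) ++ [s[j]] := by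
  unfold upSeg
  rw [seg_cons s i j hij hj]
  have e : j - i = j + 1 - (i + 1) := by omega
  rw [e, seg_snoc s (i + 1) j (by omega) hj]
  have e2 : j - (i + 1) = j - 1 + 1 - (i + 1) := by omega
  rw [List.filter_cons_of_pos (by simpa using hui), List.filter_append,
    List.filter_cons_of_pos (by simpa using huj), e2]
  simp

theorem palBSkip_iff (s : List Char) (i j : Nat) (hj : j < s.length) :
    palBSkip s i j = "Палиндром" ↔ upSeg s i j = (upSeg s i j).reverse := by
  fun_induction palBSkip with
  | case1 i j hij hup ih =>
    rw [ih hj]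
    unfold upSeg
    rw [seg_cons s i j hij hj]
    have hgi : s.getD i ' ' = s[i]'(by omega) := List.getD_eq_getElem s ' ' (by omega)
    rw [hgi] at hup
    have e : j + 1 - (i + 1) = j - i := by omega
    rw [List.filter_cons_of_neg (by simpa using hup), e]
  | case2 i j hij hui huj ih =>
    rw [ih (by omega)]
    unfold upSeg
    have hgj : s.getD j ' ' = s[j] := List.getD_eq_getElem s ' ' hj
    rw [hgj] at huj
    rw [seg_snoc s i j (by omega) hj]
    have e : j - i = j - 1 + 1 - i := by omega
    rw [List.filter_append, List.filter_cons_of_neg (by simpa using huj), e]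
    simp
  | case3 i j hij hui huj hne =>
    have hgi : s.getD i ' ' = s[i]'(by omega) := List.getD_eq_getElem s ' ' (by omega)
    have hgj : s.getD j ' ' = s[j] := List.getD_eq_getElem s ' ' hj
    rw [hgi] at hui hne; rw [hgj] at huj hne
    rw [not_not] at hui huj
    rw [upSeg_decomp s i j hij hj (by simpa using hui) (by simpa using huj)]
    constructor
    · intro h; exact absurd h (by decide)
    · intro h
      exact absurd (snoc_pal_iff.mp h).1 hne
  | case4 i j hij hui huj hne ih =>
    have hgi : s.getD i ' ' = s[i]'(by omega) := List.getD_eq_getElem s ' ' (by omega)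
    have hgj : s.getD j ' ' = s[j] := List.getD_eq_getElem s ' ' hj
    rw [hgi] at hui hne; rw [hgj] at huj hne
    rw [not_not] at hui huj hne
    rw [ih (by omega), upSeg_decomp s i j hij hj (by simpa using hui) (by simpa using huj),
      snoc_pal_iff]
    constructor
    · intro h; exact ⟨hne, h⟩
    · intro h; exact h.2
  | case5 i j hij =>
    simp only [true_iff]
    -- the window s[i..j] has at most one element, hence so does its uppercase subsequence
    apply short_pal
    calc (upSeg s i j).length ≤ ((s.drop i).take (j + 1 - i)).length :=
          List.length_filter_le _ _
      _ ≤ j + 1 - i := by simp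
      _ ≤ 1 := by omega

-- ===== VERDICT (by name: the statement is the Claim_ definition above) =====
theorem pal_up_true_spec : Claim_equal_pal_up_true := by
  intro x _
  unfold Spec_pal_up_true pal_up_true pal_up_true_alt
  rw [palScans_eq]
  cases h : palAScan x.toList with
  | some r => rfl
  | none =>
    rw [PySem.List.foldl_append_if_eq_filter]
    simp only [List.nil_append]
    cases hx : x.toList with
    | nil => simp [palBSkip]
    | cons c t =>
      have hlen : (c :: t).length - 1 < (c :: t).length := by simp
      have := palBSkip_iff (c :: t) 0 ((c :: t).length - 1) hlen
      have hseg : upSeg (c :: t) 0 ((c :: t).length - 1)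
          = (c :: t).filter (fun ch => PySem.Chars.isupper ch) := by
        unfold upSeg
        simp
      rw [hseg] at this
      set F := (c :: t).filter (fun ch => PySem.Chars.isupper ch) with hF
      by_cases hp : F = F.reverse
      · rw [if_pos hp, this.mpr hp]
      · rw [if_neg hp]
        rcases palBSkip_values (c :: t) 0 ((c :: t).length - 1) with hv | hv
        · exact absurd (this.mp hv) hp
        · exact hv.symm
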